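-- pv_equiv track=rewrite | github.com/NorphyOG/multi-auto-Clicker | automation/actions.py | _tokenize_keys
-- ===== SOURCE A (Python) =====
-- from typing import Any, Dict, List, Optional, Tuple, Callable
--
-- def _tokenize_keys(sequence: str) -> List[str]:
--     # Very small helper: treat bracketed tokens like <ENTER> as single units
--     out: List[str] = []
--     buf = ""
--     in_tag = False
--     for ch in sequence:
--         if ch == "<":
--             if buf:
--                 out.append(buf)
--                 buf = ""
--             in_tag = True
--             buf += ch
--         elif ch == ">" and in_tag:
--             buf += ch
--             out.append(buf)
--             buf = ""
--             in_tag = False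
--         else:
--             buf += ch
--     if buf:
--         out.append(buf)
--     # split on spaces except tokens like <ENTER>
--     flat: List[str] = []
--     for part in out:
--         if part.startswith("<") and part.endswith(">"):
--             flat.append(part)
--         else:
--             flat.extend([p for p in part.split(" ") if p])
--     return flat
-- ===== SOURCE B (Python) =====
-- from typing import List
--
-- def _tokenize_keys(sequence: str) -> List[str]:
--     # Split on '<' once, then close each bracketed token at its first '>',
--     # splitting everything else on spaces.
--     def words(s: str) -> List[str]:
--         return [w for w in s.split(" ") if w]
--
--     pieces = sequence.split("<")
--     flat: List[str] = words(pieces[0])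
--     for p in pieces[1:]:
--         head, sep, tail = p.partition(">")
--         if sep:
--             flat.append("<" + head + ">")
--             flat.extend(words(tail))
--         else:
--             flat.extend(words("<" + p))
--     return flat
-- ===== Notes on version B (the rewrite author's own statement) =====
-- stated objective: simpler
-- what changed: Replaces A's character-by-character state machine (buf/in_tag) plus a second flattening pass by a single split on '<' followed by partitioning each piece at its first '>' (the tag) and space-splitting the rest; the per-character Python loop becomes a few C-level str.split/str.partition calls.
import Mathlib
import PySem

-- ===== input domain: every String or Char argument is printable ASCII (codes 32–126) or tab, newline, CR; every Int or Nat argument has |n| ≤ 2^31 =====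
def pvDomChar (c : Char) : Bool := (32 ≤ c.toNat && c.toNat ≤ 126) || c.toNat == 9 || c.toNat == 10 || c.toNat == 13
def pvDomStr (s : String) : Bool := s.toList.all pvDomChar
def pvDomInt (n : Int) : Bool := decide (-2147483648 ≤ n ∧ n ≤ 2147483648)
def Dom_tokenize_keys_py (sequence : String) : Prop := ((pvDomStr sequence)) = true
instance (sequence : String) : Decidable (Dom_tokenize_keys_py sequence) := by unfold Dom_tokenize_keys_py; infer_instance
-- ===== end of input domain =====

-- B replaces A's char-by-char tag state machine by one split on '<' plus a partition at
-- the first '>' of each piece (objective: simpler); same return value on every input.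

-- ===== PORT A =====
-- A's first pass: the for-loop over the characters with state (out, buf, in_tag),
-- ported as the structural recursion over the same state (out emitted in front)
def chunksA : List Char → List Char → Bool → List (List Char)
  | [], buf, _ => if buf = [] then [] else [buf]
  | c :: rest, buf, inTag =>
    if c = '<' then
      (if buf = [] then [] else [buf]) ++ chunksA rest ['<'] true
    else if c = '>' && inTag then
      (buf ++ ['>']) :: chunksA rest [] false
    else
      chunksA rest (buf ++ [c]) inTag

-- A's second pass: keep "<...>" parts whole, split the rest on spaces dropping empties
def flatA (parts : List (List Char)) : List (List Char) :=
  parts.flatMap (fun part =>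
    if PySem.Chars.startswith part ['<'] && PySem.Chars.endswith part ['>'] then [part]
    else (PySem.Chars.splitOn part [' ']).filter (fun w => w ≠ []))

def tokenize_keys_py (sequence : String) : List String :=
  (flatA (chunksA sequence.toList [] false)).map String.ofList

-- ===== PORT B =====
-- words(s) = [w for w in s.split(" ") if w]
def wordsB (s : List Char) : List (List Char) :=
  (PySem.Chars.splitOn s [' ']).filter (fun w => w ≠ [])

-- B's loop over pieces[1:]; p.partition(">") is ported by hand (exact: takeWhile /
-- dropWhile at the first '>' are head, sep+tail of Python's partition)
def procB : List (List Char) → List (List Char)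
  | [] => []
  | p :: rest =>
    match p.dropWhile (fun c => !(c == '>')) with
    | [] => wordsB ('<' :: p) ++ procB rest
    | _ :: tail => ('<' :: (p.takeWhile (fun c => !(c == '>')) ++ ['>'])) :: (wordsB tail ++ procB rest)

def tokenize_keys_py_alt (sequence : String) : List String :=
  match PySem.Chars.splitOn sequence.toList ['<'] with
  | [] => []  -- unreachable: str.split always returns at least one piece
  | p0 :: ps => (wordsB p0 ++ procB ps).map String.ofList

-- ===== PRECONDITION & SPEC =====
def Spec_tokenize_keys_py (sequence : String) (out : List String) : Prop := out = tokenize_keys_py_alt sequence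
instance (sequence : String) (out : List String) : Decidable (Spec_tokenize_keys_py sequence out) := by unfold Spec_tokenize_keys_py; infer_instance

-- ===== CLAIM (what is proved, stated in full; the proofs are below) =====
def Claim_equal_tokenize_keys_py : Prop := ∀ (sequence : String), Dom_tokenize_keys_py sequence → Spec_tokenize_keys_py sequence (tokenize_keys_py sequence)

-- ===== LEMMAS AND PROOFS =====

-- proof-side reference form of split-on-'<'
def splitLt : List Char → List (List Char)
  | [] => [[]]
  | c :: t => if c = '<' then [] :: splitLt t else (splitLt t).modifyHead (c :: ·)

lemma splitLt_ne_nil (l : List Char) : splitLt l ≠ [] := by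
  induction l with
  | nil => simp [splitLt]
  | cons c t ih =>
    simp only [splitLt]
    split
    · simp
    · cases h : splitLt t with
      | nil => exact absurd h ih
      | cons q qs => simp [List.modifyHead]

lemma splitOn_go_eq (fuel : Nat) : ∀ (l cur : List Char) (acc : List (List Char)) (_ : List.length l < fuel),
    PySem.Chars.splitOn.go ['<'] fuel l cur acc
      = acc.reverse ++ (splitLt l).modifyHead (cur.reverse ++ ·) := by
  induction fuel with
  | zero => intro l cur acc h; omega
  | succ n ih =>
    intro l cur acc h
    cases l with
    | nil => simp [PySem.Chars.splitOn.go, splitLt]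
    | cons c rest =>
      by_cases hc : c = '<'
      · subst hc
        rw [PySem.Chars.splitOn.go]
        simp only [List.isPrefixOf]
        rw [if_pos (by simp)]
        rw [ih _ _ _ (by simp at h ⊢; omega)]
        rw [splitLt]
        rw [if_pos rfl]
        cases hs : splitLt rest with
        | nil => exact absurd hs (splitLt_ne_nil rest)
        | cons q qs => simp [List.modifyHead, hs]
      · rw [PySem.Chars.splitOn.go]
        rw [if_neg (by simp [List.isPrefixOf]; intro hh; exact hc hh.symm)]
        rw [ih _ _ _ (by simp at h ⊢; omega)]
        rw [splitLt]
        rw [if_neg hc]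
        cases hs : splitLt rest with
        | nil => exact absurd hs (splitLt_ne_nil rest)
        | cons q qs => simp [List.modifyHead]

lemma splitOn_eq_splitLt (cs : List Char) : PySem.Chars.splitOn cs ['<'] = splitLt cs := by
  rw [PySem.Chars.splitOn, splitOn_go_eq (cs.length + 1) cs [] [] (by omega)]
  cases hs : splitLt cs with
  | nil => exact absurd hs (splitLt_ne_nil cs)
  | cons q qs => simp [List.modifyHead]

lemma wordsB_nil : wordsB [] = [] := by decide

lemma startswith_lt_false {part : List Char} (h : '<' ∉ part) :
    PySem.Chars.startswith part ['<'] = false := by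
  rw [Bool.eq_false_iff]
  intro hc
  have hs : ('<' : Char) ∈ part :=
    ((PySem.Chars.startswith_iff part ['<']).mp hc).sublist.subset (by simp)
  exact h hs

lemma endswith_gt_false {m : List Char} (h : '>' ∉ m) :
    PySem.Chars.endswith ('<' :: m) ['>'] = false := by
  rw [Bool.eq_false_iff]
  intro hc
  have hs : ('>' : Char) ∈ '<' :: m :=
    ((PySem.Chars.endswith_iff ('<' :: m) ['>']).mp hc).sublist.subset (by simp)
  rcases List.mem_cons.mp hs with h1 | h1
  · exact absurd h1 (by decide)
  · exact h h1

lemma flatA_append (a b : List (List Char)) : flatA (a ++ b) = flatA a ++ flatA b := by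
  simp [flatA]

lemma flatA_nontag {part : List Char} (h : '<' ∉ part) : flatA [part] = wordsB part := by
  simp [flatA, wordsB, startswith_lt_false h]

lemma flatA_open {m : List Char} (h : '>' ∉ m) : flatA ['<' :: m] = wordsB ('<' :: m) := by
  simp [flatA, wordsB, endswith_gt_false h]

lemma flatA_tag (m : List Char) : flatA ['<' :: (m ++ ['>'])] = ['<' :: (m ++ ['>'])] := by
  have h1 : PySem.Chars.startswith ('<' :: (m ++ ['>'])) ['<'] = true :=
    (PySem.Chars.startswith_iff _ _).mpr ⟨m ++ ['>'], rfl⟩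
  have h2 : PySem.Chars.endswith ('<' :: (m ++ ['>'])) ['>'] = true :=
    (PySem.Chars.endswith_iff _ _).mpr ⟨'<' :: m, by simp⟩
  simp [flatA, h1, h2]

lemma dropWhile_no_gt {m : List Char} (h : '>' ∉ m) :
    m.dropWhile (fun c => !(c == '>')) = [] := by
  rw [List.dropWhile_eq_nil_iff]
  intro x hx
  simp
  exact fun he => h (he ▸ hx)

lemma dropWhile_gt {m r : List Char} (h : '>' ∉ m) :
    (m ++ '>' :: r).dropWhile (fun c => !(c == '>')) = '>' :: r := by
  induction m with
  | nil => simp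
  | cons a t ih =>
    have ha : a ≠ '>' := fun he => h (he ▸ List.mem_cons_self)
    simp only [List.cons_append, List.dropWhile_cons]
    simp [ha]
    exact ih (fun hx => h (List.mem_cons_of_mem _ hx))

lemma takeWhile_gt {m r : List Char} (h : '>' ∉ m) :
    (m ++ '>' :: r).takeWhile (fun c => !(c == '>')) = m := by
  induction m with
  | nil => simp
  | cons a t ih =>
    have ha : a ≠ '>' := fun he => h (he ▸ List.mem_cons_self)
    simp only [List.cons_append, List.takeWhile_cons]
    simp [ha]
    exact ih (fun hx => h (List.mem_cons_of_mem _ hx))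

lemma procB_no_gt {m : List Char} (rest : List (List Char)) (h : '>' ∉ m) :
    procB (m :: rest) = wordsB ('<' :: m) ++ procB rest := by
  rw [procB, dropWhile_no_gt h]

lemma procB_gt {m r : List Char} (rest : List (List Char)) (h : '>' ∉ m) :
    procB ((m ++ '>' :: r) :: rest)
      = ('<' :: (m ++ ['>'])) :: (wordsB r ++ procB rest) := by
  rw [procB, dropWhile_gt h, takeWhile_gt h]

-- the invariant of A's loop: with in_tag clear, the pending buf (no '<' in it) joins the
-- run up to the next '<'; with in_tag set, buf = '<'::m (no '<' or '>' in m) is the open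
-- tag that B's partition of the current '<'-piece closes at its first '>'
lemma mainLemma : ∀ cs : List Char,
    (∀ buf, '<' ∉ buf →
      flatA (chunksA cs buf false) = wordsB (buf ++ (splitLt cs).headI) ++ procB (splitLt cs).tail)
    ∧ (∀ m, '<' ∉ m → '>' ∉ m →
      flatA (chunksA cs ('<' :: m) true) = procB ((m ++ (splitLt cs).headI) :: (splitLt cs).tail)) := by
  intro cs
  induction cs with
  | nil =>
    constructor
    · intro buf hb
      by_cases hbuf : buf = []
      · subst hbuf; simp [chunksA, flatA, wordsB_nil, splitLt, procB]
      · simp only [chunksA, if_neg hbuf, splitLt, List.headI, List.tail, procB]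
        rw [flatA_nontag hb]
        simp
    · intro m hm1 hm2
      simp only [chunksA, if_neg (List.cons_ne_nil _ _), splitLt, List.headI, List.tail]
      rw [flatA_open hm2, List.append_nil, procB_no_gt [] hm2]
      simp [procB]
  | cons c rest ih =>
    obtain ⟨ih1, ih2⟩ := ih
    constructor
    · intro buf hb
      by_cases hc : c = '<'
      · subst hc
        rw [chunksA, if_pos rfl, flatA_append]
        rw [splitLt, if_pos rfl]
        have h2 := ih2 [] (by simp) (by simp)
        cases hs : splitLt rest with
        | nil => exact absurd hs (splitLt_ne_nil rest)
        | cons q qs =>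
          rw [hs] at h2
          simp only [List.headI, List.tail, List.nil_append] at h2 ⊢
          rw [h2]
          by_cases hbuf : buf = []
          · subst hbuf; simp [flatA, wordsB_nil]
          · rw [if_neg hbuf, flatA_nontag hb]
            simp
      · rw [chunksA, if_neg hc, if_neg (by simp : ¬((decide (c = '>') && false) = true))]
        have hbc : ('<' : Char) ∉ buf ++ [c] := by
          intro hmem
          rcases List.mem_append.mp hmem with hx | hx
          · exact hb hx
          · simp at hx; exact hc hx.symm
        have h1 := ih1 (buf ++ [c]) hbc
        rw [h1, splitLt, if_neg hc]
        cases hs : splitLt rest with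
        | nil => exact absurd hs (splitLt_ne_nil rest)
        | cons q qs => simp [List.modifyHead, List.append_assoc]
    · intro m hm1 hm2
      by_cases hc : c = '<'
      · subst hc
        rw [chunksA, if_pos rfl, flatA_append, if_neg (List.cons_ne_nil _ _)]
        rw [splitLt, if_pos rfl]
        have h2 := ih2 [] (by simp) (by simp)
        cases hs : splitLt rest with
        | nil => exact absurd hs (splitLt_ne_nil rest)
        | cons q qs =>
          rw [hs] at h2
          simp only [List.headI, List.tail, List.nil_append] at h2 ⊢
          rw [flatA_open hm2, h2, List.append_nil, procB_no_gt _ hm2]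
      · by_cases hgt : c = '>'
        · subst hgt
          rw [chunksA, if_neg hc, if_pos (by simp : ((decide (('>' : Char) = '>') && true) = true))]
          rw [splitLt, if_neg hc]
          have h1 := ih1 [] (by simp)
          cases hs : splitLt rest with
          | nil => exact absurd hs (splitLt_ne_nil rest)
          | cons q qs =>
            rw [hs] at h1
            simp only [List.headI, List.tail, List.nil_append] at h1 ⊢
            simp only [List.modifyHead]
            rw [procB_gt _ hm2]
            have hsplit : ('<' :: m) ++ ['>'] = '<' :: (m ++ ['>']) := by simp
            rw [show flatA ((('<' :: m) ++ ['>']) :: chunksA rest [] false)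
                  = flatA [('<' :: m) ++ ['>']] ++ flatA (chunksA rest [] false) from by
                    rw [← flatA_append]; rfl]
            rw [hsplit, flatA_tag, h1]
            simp
        · rw [chunksA, if_neg hc, if_neg (by simp [hgt])]
          rw [List.cons_append]
          have hmc1 : ('<' : Char) ∉ m ++ [c] := by
            intro hmem
            rcases List.mem_append.mp hmem with hx | hx
            · exact hm1 hx
            · simp at hx; exact hc hx.symm
          have hmc2 : ('>' : Char) ∉ m ++ [c] := by
            intro hmem
            rcases List.mem_append.mp hmem with hx | hx
            · exact hm2 hx
            · simp at hx; exact hgt hx.symm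
          have h2 := ih2 (m ++ [c]) hmc1 hmc2
          rw [h2, splitLt, if_neg hc]
          cases hs : splitLt rest with
          | nil => exact absurd hs (splitLt_ne_nil rest)
          | cons q qs => simp [List.modifyHead, List.append_assoc]

-- ===== VERDICT (by name: the statement is the Claim_ definition above) =====
theorem tokenize_keys_py_spec : Claim_equal_tokenize_keys_py := by
  intro s _
  unfold Spec_tokenize_keys_py
  rw [tokenize_keys_py, tokenize_keys_py_alt, splitOn_eq_splitLt]
  cases hs : splitLt s.toList with
  | nil => exact absurd hs (splitLt_ne_nil _)
  | cons q qs =>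
    have h1 := (mainLemma s.toList).1 [] (by simp)
    rw [hs] at h1
    simp only [List.headI, List.tail, List.nil_append] at h1
    rw [h1]
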